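-- pv_equiv track=rewrite | github.com/emilinkinpark/Investor_Futures | ui/dca_tab.py | _detect_tpsl_presence
-- ===== SOURCE A (Python) =====
-- from typing import Dict, List, Optional, Tuple
--
-- STOP_TYPES = {"STOP", "STOP_MARKET", "TRAILING_STOP_MARKET"}
--
-- TP_TYPES = {"TAKE_PROFIT", "TAKE_PROFIT_MARKET"}
--
-- def _detect_tpsl_presence(orders: List[dict], side: str) -> Tuple[bool, bool]:
--     want_side = "SELL" if side == "LONG" else "BUY"
--     has_tp, has_sl = False, False
--     for o in orders or []:
--         if o.get("side") != want_side:
--             continue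
--         t = o.get("type")
--         if t in TP_TYPES:
--             has_tp = True
--         elif t in STOP_TYPES:
--             has_sl = True
--         if has_tp and has_sl:
--             break
--     return has_tp, has_sl
-- ===== SOURCE B (Python) =====
-- from typing import Dict, List, Optional, Tuple
--
-- STOP_TYPES = {"STOP", "STOP_MARKET", "TRAILING_STOP_MARKET"}
-- TP_TYPES = {"TAKE_PROFIT", "TAKE_PROFIT_MARKET"}
--
-- def _detect_tpsl_presence(orders: List[dict], side: str) -> Tuple[bool, bool]:
--     want_side = "SELL" if side == "LONG" else "BUY"
--     pool = orders or []
--     has_tp = any(o.get("side") == want_side and o.get("type") in TP_TYPES for o in pool)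
--     has_sl = any(o.get("side") == want_side and o.get("type") in STOP_TYPES for o in pool)
--     return has_tp, has_sl
-- ===== Notes on version B (the rewrite author's own statement) =====
-- stated objective: idiomatic
-- what changed: Replaces the stateful single loop (flag flipping, elif branching, early break once both flags set) by two independent short-circuiting any() passes, one per flag, with no mutable state or branches.
import Mathlib
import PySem

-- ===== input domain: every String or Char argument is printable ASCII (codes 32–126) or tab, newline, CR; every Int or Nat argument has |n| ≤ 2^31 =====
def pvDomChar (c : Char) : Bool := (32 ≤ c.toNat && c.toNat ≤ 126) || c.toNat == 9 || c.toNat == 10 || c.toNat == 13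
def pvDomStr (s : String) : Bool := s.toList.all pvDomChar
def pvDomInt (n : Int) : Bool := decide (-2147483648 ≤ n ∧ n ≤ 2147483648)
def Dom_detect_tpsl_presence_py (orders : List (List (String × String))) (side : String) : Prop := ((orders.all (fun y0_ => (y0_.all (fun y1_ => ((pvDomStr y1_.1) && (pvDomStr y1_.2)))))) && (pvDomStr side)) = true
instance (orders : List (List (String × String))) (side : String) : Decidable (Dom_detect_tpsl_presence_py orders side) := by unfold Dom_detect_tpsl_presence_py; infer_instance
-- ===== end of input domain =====

-- B replaces A's stateful flag-flipping loop (elif branches, early break) by two independent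
-- short-circuiting any() passes, one per flag: idiomatic, no mutable state.


-- ===== PORT A =====
-- A's loop: per-order side check, TP/stop elif branch flipping two flags, early break once both set.
def pvLoopA (want : String) : List (List (String × String)) → Bool → Bool → Bool × Bool
  | [], tp, sl => (tp, sl)
  | o :: rest, tp, sl =>
    if (PySem.Dict.ofList o).get? "side" ≠ some want then
      pvLoopA want rest tp sl
    else
      let t := (PySem.Dict.ofList o).get? "type"
      let tp' := if t = some "TAKE_PROFIT" ∨ t = some "TAKE_PROFIT_MARKET" then true else tp
      let sl' := if (¬(t = some "TAKE_PROFIT" ∨ t = some "TAKE_PROFIT_MARKET")) ∧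
                    (t = some "STOP" ∨ t = some "STOP_MARKET" ∨ t = some "TRAILING_STOP_MARKET")
                 then true else sl
      if tp' && sl' then (tp', sl') else pvLoopA want rest tp' sl'

def detect_tpsl_presence_py (orders : List (List (String × String))) (side : String) : Bool × Bool :=
  pvLoopA (if side = "LONG" then "SELL" else "BUY") orders false false

-- ===== PORT B =====
-- TP_TYPES / STOP_TYPES as lists of Optional[str] values (o.get("type") may be None).
def pvTPTypes : List (Option String) := [some "TAKE_PROFIT", some "TAKE_PROFIT_MARKET"]
def pvStopTypes : List (Option String) := [some "STOP", some "STOP_MARKET", some "TRAILING_STOP_MARKET"]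

def detect_tpsl_presence_py_alt (orders : List (List (String × String))) (side : String) : Bool × Bool :=
  let want := if side = "LONG" then "SELL" else "BUY"
  let has_tp := orders.any (fun o =>
    (PySem.Dict.ofList o).get? "side" == some want && pvTPTypes.contains ((PySem.Dict.ofList o).get? "type"))
  let has_sl := orders.any (fun o =>
    (PySem.Dict.ofList o).get? "side" == some want && pvStopTypes.contains ((PySem.Dict.ofList o).get? "type"))
  (has_tp, has_sl)

-- ===== PRECONDITION & SPEC =====
def Spec_detect_tpsl_presence_py (orders : List (List (String × String))) (side : String) (out : Bool × Bool) : Prop := out = detect_tpsl_presence_py_alt orders side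
instance (orders : List (List (String × String))) (side : String) (out : Bool × Bool) : Decidable (Spec_detect_tpsl_presence_py orders side out) := by unfold Spec_detect_tpsl_presence_py; infer_instance

-- ===== CLAIM (what is proved, stated in full; the proofs are below) =====
def Claim_equal_detect_tpsl_presence_py : Prop := ∀ (orders : List (List (String × String))) (side : String), Dom_detect_tpsl_presence_py orders side → Spec_detect_tpsl_presence_py orders side (detect_tpsl_presence_py orders side)

-- ===== LEMMAS AND PROOFS =====
def pvIsTP (t : Option String) : Bool :=
  t == some "TAKE_PROFIT" || t == some "TAKE_PROFIT_MARKET"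
def pvIsSL (t : Option String) : Bool :=
  t == some "STOP" || t == some "STOP_MARKET" || t == some "TRAILING_STOP_MARKET"

def pvFT (want : String) (o : List (String × String)) : Bool :=
  ((PySem.Dict.ofList o).get? "side" == some want) && pvIsTP ((PySem.Dict.ofList o).get? "type")
def pvFS (want : String) (o : List (String × String)) : Bool :=
  ((PySem.Dict.ofList o).get? "side" == some want) && pvIsSL ((PySem.Dict.ofList o).get? "type")

theorem pvLoopA_eq (want : String) (os : List (List (String × String))) :
    ∀ tp sl, pvLoopA want os tp sl = (tp || os.any (pvFT want), sl || os.any (pvFS want)) := by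
  induction os with
  | nil => intro tp sl; simp [pvLoopA]
  | cons o rest ih =>
    intro tp sl
    by_cases hside : (PySem.Dict.ofList o).get? "side" = some want
    · by_cases hT : pvIsTP ((PySem.Dict.ofList o).get? "type") = true
      · simp only [pvIsTP, Bool.or_eq_true, beq_iff_eq] at hT
        rcases hT with h | h <;> cases sl <;>
          simp [pvLoopA, hside, h, ih, pvFT, pvFS, pvIsTP, pvIsSL]
      · by_cases hS : pvIsSL ((PySem.Dict.ofList o).get? "type") = true
        · simp only [pvIsSL, Bool.or_eq_true, beq_iff_eq] at hS
          simp only [pvIsTP, Bool.or_eq_true, beq_iff_eq, not_or] at hT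
          rcases hS with (h | h) | h <;> cases tp <;>
            simp [pvLoopA, hside, h, ih, pvFT, pvFS, pvIsTP, pvIsSL]
        · simp only [pvIsTP, Bool.or_eq_true, beq_iff_eq, not_or] at hT
          simp only [pvIsSL, Bool.or_eq_true, beq_iff_eq, not_or] at hS
          cases tp <;> cases sl <;>
            simp [pvLoopA, hside, ih, pvFT, pvFS, pvIsTP, pvIsSL,
              hT.1, hT.2, hS.1.1, hS.1.2, hS.2,
              beq_eq_false_iff_ne.mpr hT.1, beq_eq_false_iff_ne.mpr hT.2,
              beq_eq_false_iff_ne.mpr hS.1.1, beq_eq_false_iff_ne.mpr hS.1.2,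
              beq_eq_false_iff_ne.mpr hS.2]
    · simp [pvLoopA, hside, ih, pvFT, pvFS, beq_eq_false_iff_ne.mpr hside]

-- ===== VERDICT (by name: the statement is the Claim_ definition above) =====
theorem detect_tpsl_presence_py_spec : Claim_equal_detect_tpsl_presence_py := by
  intro orders side _
  unfold Spec_detect_tpsl_presence_py detect_tpsl_presence_py detect_tpsl_presence_py_alt
  rw [pvLoopA_eq]
  simp only [Bool.false_or, Prod.mk.injEq]
  constructor <;>
    exact List.any_congr rfl fun o => by
      rw [Bool.eq_iff_iff]
      simp [pvFT, pvFS, pvIsTP, pvIsSL, pvTPTypes, pvStopTypes]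
      try tauto
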